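-- pv_equiv track=rewrite | github.com/Prussiancatboy/Best-buy-2.0 | promotions.py | add_promotion
-- ===== SOURCE A (Python) =====
-- def add_promotion(total, price, quantity):
--     """This code adds the promotion"""
--     flag = True
--     while flag is True:
--         result = quantity - 3
--         if result >= 0:
--             quantity -= 3
--             total = total - price
--         else:
--             flag = False
--     return total
-- ===== SOURCE B (Python) =====
-- def add_promotion(total, price, quantity):
--     """This code adds the promotion"""
--     if quantity >= 0:
--         return total - price * (quantity // 3)
--     return total
-- ===== Notes on version B (the rewrite author's own statement) =====
-- stated objective: faster
-- what changed: Replaces the subtract-3-per-iteration while loop with a closed-form total - price*(quantity//3) (quantity left unchanged when negative).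
import Mathlib
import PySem

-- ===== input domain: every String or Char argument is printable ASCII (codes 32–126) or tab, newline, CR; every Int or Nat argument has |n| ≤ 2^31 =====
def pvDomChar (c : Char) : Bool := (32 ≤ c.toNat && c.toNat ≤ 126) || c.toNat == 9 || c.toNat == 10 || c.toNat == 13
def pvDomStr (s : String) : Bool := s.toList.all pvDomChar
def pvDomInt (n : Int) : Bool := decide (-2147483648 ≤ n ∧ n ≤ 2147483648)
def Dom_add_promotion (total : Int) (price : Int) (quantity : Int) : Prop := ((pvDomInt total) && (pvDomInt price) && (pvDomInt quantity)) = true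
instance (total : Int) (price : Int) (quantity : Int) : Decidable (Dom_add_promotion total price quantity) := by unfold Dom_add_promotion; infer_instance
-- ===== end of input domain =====

-- ===== PORT A =====
-- While loop of A: subtract price once per iteration while quantity - 3 >= 0.
def addPromotionLoop (total : Int) (price : Int) (quantity : Int) : Int :=
  if 0 ≤ quantity - 3 then
    addPromotionLoop (total - price) price (quantity - 3)
  else total
termination_by quantity.toNat
decreasing_by omega

def add_promotion (total : Int) (price : Int) (quantity : Int) : Int :=
  addPromotionLoop total price quantity

-- ===== PORT B =====
-- B changes the O(quantity) loop into closed-form arithmetic (one honest line: faster by asymptotics).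
def add_promotion_alt (total : Int) (price : Int) (quantity : Int) : Int :=
  if 0 ≤ quantity then total - price * PySem.Int.floordiv quantity 3
  else total

-- ===== PRECONDITION & SPEC =====
def Spec_add_promotion (total : Int) (price : Int) (quantity : Int) (out : Int) : Prop := out = add_promotion_alt total price quantity
instance (total : Int) (price : Int) (quantity : Int) (out : Int) : Decidable (Spec_add_promotion total price quantity out) := by unfold Spec_add_promotion; infer_instance

-- ===== CLAIM (what is proved, stated in full; the proofs are below) =====
def Claim_equal_add_promotion : Prop := ∀ (total : Int) (price : Int) (quantity : Int), Dom_add_promotion total price quantity → Spec_add_promotion total price quantity (add_promotion total price quantity)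

-- ===== LEMMAS AND PROOFS =====

-- ===== VERDICT (by name: the statement is the Claim_ definition above) =====
theorem loop_eq (total price quantity : Int) :
    addPromotionLoop total price quantity =
      if 0 ≤ quantity then total - price * PySem.Int.floordiv quantity 3 else total := by
  by_cases h : 0 ≤ quantity - 3
  · rw [addPromotionLoop, if_pos h, loop_eq (total - price) price (quantity - 3)]
    rw [if_pos (by omega : (0:Int) ≤ quantity - 3), if_pos (by omega : (0:Int) ≤ quantity)]
    rw [PySem.Int.floordiv_eq_ediv_of_pos (by omega), PySem.Int.floordiv_eq_ediv_of_pos (by omega)]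
    have : quantity / 3 = (quantity - 3) / 3 + 1 := by omega
    rw [this]; ring
  · rw [addPromotionLoop, if_neg h]
    by_cases hq : 0 ≤ quantity
    · rw [if_pos hq, PySem.Int.floordiv_eq_ediv_of_pos (by omega)]
      have : quantity / 3 = 0 := by omega
      rw [this]; ring
    · rw [if_neg hq]
termination_by quantity.toNat
decreasing_by omega

theorem add_promotion_spec : Claim_equal_add_promotion := by
  intro total price quantity _
  unfold Spec_add_promotion add_promotion add_promotion_alt
  exact loop_eq total price quantity
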